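-- pv_equiv track=rewrite | github.com/mina19/AdventOfCode | 2024/7/day07.py | all_combinations_memoized
-- ===== SOURCE A (Python) =====
-- def all_combinations_memoized(input, memo=None, concat=False):
--     # Create all possible results of * and + and concatenation if concat is True
--     # Operators are always evaluated left-to-right, not according to precedence rules.
--
--     # Example:
--     # all_combinations_memoized([81, 40, 27][::-1], concat=True)
--     # all_combinations_memoized([27, 40, 81], concat=True)
--     # (81,) {81}
--     # (40, 81) {
--     #     121 = 81 + 40,
--     #     3240 = 81 * 40,
--     #     8140 = 81 || 40
--     # }
--     # Returns: {
--     #     148 = (81 + 40) + 27,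
--     #     3267 = (81 + 40) * 27,
--     #     12127 = (81 + 40) || 27,
--     #     3267 = (81 * 40) + 27, (this is a repeat)
--     #     87480 = (81 * 40) * 27,
--     #     324027 = (81 * 40) || 27,
--     #     8167 = (81 || 40) + 27,
--     #     219780 = (81 || 40) * 27,
--     #     814027 = (81 || 40) || 27,
--     # }
--
--     # Initialize memo dictionary if not provided
--     if memo is None:
--         memo = {}
--
--     # Convert input to tuple so it can be used as dictionary key
--     input_key = tuple(input)
--
--     # If we've already calculated this combination, return it
--     if input_key in memo:
--         return memo[input_key]
--
--     # Base case: single number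
--     if len(input) == 1:
--         # Save like this: memo[(input[0],)] = {input[0]}
--         memo[input_key] = set([input[0]])
--         return memo[input_key]
--
--     all_results = set()
--
--     # Get sub-combinations (memoized)
--     # Take all numbers but the first one
--     sub_combinations = all_combinations_memoized(input[1:], memo, concat=concat)
--
--     # Calculate multiplications and additions
--     all_results.update(input[0] + x for x in sub_combinations)
--     all_results.update(input[0] * x for x in sub_combinations)
--     # If concatenation for Part 2:
--     if concat:
--         all_results.update(int(str(x) + str(input[0])) for x in sub_combinations)
--
--     # Store result in memo before returning
--     memo[input_key] = all_results
--     return all_results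
-- ===== SOURCE B (Python) =====
-- def all_combinations_memoized(input, memo=None, concat=False):
--     # Iterative fold from the last element forward; the memo parameter is kept
--     # for signature compatibility but is not consulted or mutated.
--     results = {input[-1]}
--     for elem in reversed(input[:-1]):
--         nxt = set()
--         nxt.update(elem + x for x in results)
--         nxt.update(elem * x for x in results)
--         if concat:
--             nxt.update(int(str(x) + str(elem)) for x in results)
--         results = nxt
--     return results
-- ===== Notes on version B (the rewrite author's own statement) =====
-- stated objective: simpler
-- what changed: Replaces the memoized suffix recursion (with its dict threading) by a plain iterative fold that starts from the last element and combines each earlier element with the running result set, dropping memo lookup and mutation entirely.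
-- outside the precondition, e.g. on all_combinations_memoized([5], {(5,): {99}}, False): A returns {99}, B returns {5}
import Mathlib
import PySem

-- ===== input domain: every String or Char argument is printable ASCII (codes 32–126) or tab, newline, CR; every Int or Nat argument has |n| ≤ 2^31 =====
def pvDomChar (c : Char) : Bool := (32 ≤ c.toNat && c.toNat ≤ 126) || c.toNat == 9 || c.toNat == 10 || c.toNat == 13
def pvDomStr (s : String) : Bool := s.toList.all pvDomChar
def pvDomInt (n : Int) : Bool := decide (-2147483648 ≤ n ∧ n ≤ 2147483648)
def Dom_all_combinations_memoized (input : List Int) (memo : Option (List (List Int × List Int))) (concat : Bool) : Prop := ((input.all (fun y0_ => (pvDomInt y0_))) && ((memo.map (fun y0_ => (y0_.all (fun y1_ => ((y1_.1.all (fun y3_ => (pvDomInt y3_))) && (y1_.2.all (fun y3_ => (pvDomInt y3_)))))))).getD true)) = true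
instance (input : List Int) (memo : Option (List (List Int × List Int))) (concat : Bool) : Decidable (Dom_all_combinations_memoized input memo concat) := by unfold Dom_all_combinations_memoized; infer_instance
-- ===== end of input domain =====

-- B replaces A's memoized suffix recursion by an iterative fold over the elements,
-- dropping the memo cache (objective: simpler).  Equivalence is about the RETURN
-- value only: A mutates the caller's memo dict in place, B does not.

-- ===== PORT A =====
-- memoized suffix recursion, threading the memo dict (assoc list, first-match lookup,
-- new keys appended — exactly how A's dict behaves here)
def pvGoA (input : List Int) (memo : List (List Int × List Int)) (concat : Bool) :
    List Int × List (List Int × List Int) :=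
  match memo.find? (fun p => p.1 == input) with
  | some p => (p.2, memo)                     -- 'if input_key in memo: return memo[input_key]'
  | none =>
    match input with
    | [] => ([], memo)                        -- Python: infinite recursion (RecursionError); outside Pre_
    | [x] => ([x], memo ++ [([x], [x])])      -- base case, memo[input_key] = {input[0]}
    | x :: y :: rest =>
      let r := pvGoA (y :: rest) memo concat  -- sub_combinations (memoized)
      let s1 := PySem.Set.update PySem.Set.empty (r.1.map (fun v => x + v))
      let s2 := PySem.Set.update s1 (r.1.map (fun v => x * v))
      -- int(str(x) + str(input[0])): getD 0 is unreachable under Pre_ (ValueError excluded)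
      let allRes := if concat then
          PySem.Set.update s2 (r.1.map (fun v =>
            (PySem.Int.ofStr? (PySem.Int.toStr v ++ PySem.Int.toStr x)).getD 0))
        else s2
      (allRes, r.2 ++ [(x :: y :: rest, allRes)])
termination_by input.length

def all_combinations_memoized (input : List Int) (memo : Option (List (List Int × List Int))) (concat : Bool) : List Int :=
  (pvGoA input (memo.getD []) concat).1       -- 'if memo is None: memo = {}'

-- ===== PORT B =====
-- one combining step of B's loop body: build nxt from the running result set
def pvStepB (concat : Bool) (results : List Int) (elem : Int) : List Int :=
  let nxt := PySem.Set.update PySem.Set.empty (results.map (fun x => elem + x))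
  let nxt := PySem.Set.update nxt (results.map (fun x => elem * x))
  if concat then
    PySem.Set.update nxt (results.map (fun x =>
      (PySem.Int.ofStr? (PySem.Int.toStr x ++ PySem.Int.toStr elem)).getD 0))
  else nxt

def all_combinations_memoized_alt (input : List Int) (memo : Option (List (List Int × List Int))) (concat : Bool) : List Int :=
  match PySem.List.pyGet? input (-1) with
  | none => []                                -- Python B: IndexError on empty input; outside Pre_
  | some last =>
    ((PySem.List.slice input none (some (-1))).reverse).foldl
      (fun results elem => pvStepB concat results elem)
      (PySem.Set.add PySem.Set.empty last)

-- ===== PRECONDITION & SPEC =====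
-- Pre_ excludes (a) inputs where A raises — the empty list (RecursionError) and
-- concat=True with a negative element before the last (ValueError in int()) — and
-- (b) pre-populated memos already containing a nonempty suffix of input as a key,
-- where A returns the caller's cached value unexamined, an artefact of the cache.
def Pre_all_combinations_memoized (input : List Int) (memo : Option (List (List Int × List Int))) (concat : Bool) : Prop :=
  input ≠ [] ∧
  (∀ p ∈ memo.getD [], p.1 = [] ∨ ¬ p.1 <:+ input) ∧
  (concat = true → ∀ v ∈ input.dropLast, 0 ≤ v)
instance (input : List Int) (memo : Option (List (List Int × List Int))) (concat : Bool) : Decidable (Pre_all_combinations_memoized input memo concat) := by unfold Pre_all_combinations_memoized; infer_instance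

def pvWitness_all_combinations_memoized : List Int × (Option (List (List Int × List Int))) × Bool := ([2, 3], none, true)

def Spec_all_combinations_memoized (input : List Int) (memo : Option (List (List Int × List Int))) (concat : Bool) (out : List Int) : Prop := out = all_combinations_memoized_alt input memo concat
instance (input : List Int) (memo : Option (List (List Int × List Int))) (concat : Bool) (out : List Int) : Decidable (Spec_all_combinations_memoized input memo concat out) := by unfold Spec_all_combinations_memoized; infer_instance

-- ===== CLAIM (what is proved, stated in full; the proofs are below) =====
def Claim_equal_all_combinations_memoized : Prop := ∀ (input : List Int) (memo : Option (List (List Int × List Int))) (concat : Bool), Dom_all_combinations_memoized input memo concat → Pre_all_combinations_memoized input memo concat → Spec_all_combinations_memoized input memo concat (all_combinations_memoized input memo concat)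

-- ===== LEMMAS AND PROOFS =====

-- the common mathematical value: the set of all left-to-right +/*/concat results
def pvF : List Int → Bool → List Int
  | [], _ => []
  | [x], _ => [x]
  | x :: y :: rest, c => pvStepB c (pvF (y :: rest) c) x

theorem pvF_cons (x : Int) (m : List Int) (c : Bool) (hm : m ≠ []) :
    pvF (x :: m) c = pvStepB c (pvF m c) x := by
  cases m with
  | nil => exact absurd rfl hm
  | cons y rest => rfl

theorem pvGoA_fst (concat : Bool) :
    ∀ (input : List Int), input ≠ [] →
    ∀ (memo : List (List Int × List Int)),
      (∀ p ∈ memo, p.1 = [] ∨ ¬ p.1 <:+ input) →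
      (pvGoA input memo concat).1 = pvF input concat := by
  intro input
  induction input with
  | nil => intro h; exact absurd rfl h
  | cons x tail ih =>
    intro _ memo hmemo
    have hfind : memo.find? (fun p => p.1 == (x :: tail)) = none := by
      rw [List.find?_eq_none]
      intro p hp
      rcases hmemo p hp with h | h
      · simp [h]
      · simp only [beq_iff_eq]
        intro hk; exact h (hk ▸ List.suffix_refl _)
    cases tail with
    | nil => simp [pvGoA, hfind, pvF]
    | cons y rest =>
      have hrec : (pvGoA (y :: rest) memo concat).1 = pvF (y :: rest) concat := by
        apply ih (by simp) memo
        intro p hp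
        rcases hmemo p hp with h | h
        · exact Or.inl h
        · exact Or.inr (fun hs => h (hs.trans (List.suffix_cons x _)))
      rw [pvGoA, hfind]
      simp only [pvF, ← hrec]
      rfl

theorem pvFoldr_step (c : Bool) :
    ∀ (l : List Int) (z : Int),
      l.foldr (fun elem results => pvStepB c results elem) [z] = pvF (l ++ [z]) c := by
  intro l z
  induction l with
  | nil => rfl
  | cons e l ih =>
    have hne : l ++ [z] ≠ [] := by simp
    simp only [List.foldr_cons, ih, List.cons_append, pvF_cons e (l ++ [z]) c hne]

theorem alt_eq_pvF (input : List Int) (memo : Option (List (List Int × List Int))) (c : Bool)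
    (h : input ≠ []) :
    all_combinations_memoized_alt input memo c = pvF input c := by
  have hlast : PySem.List.pyGet? input (-1) = some (input.getLast h) := by
    cases input with
    | nil => exact absurd rfl h
    | cons a l =>
      simp [PySem.List.pyGet?, PySem.List.pyIdx?, List.getLast_eq_getElem]
      rfl
  unfold all_combinations_memoized_alt
  rw [hlast, PySem.List.slice_to_neg_one]
  dsimp only
  rw [List.foldl_reverse]
  have haddE : PySem.Set.add PySem.Set.empty (input.getLast h) = [input.getLast h] := rfl
  simp only [haddE]
  rw [show (fun (x : Int) (y : List Int) => pvStepB c y x) = (fun x y => (fun results elem => pvStepB c results elem) y x) from rfl]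
  rw [pvFoldr_step c input.dropLast (input.getLast h), List.dropLast_append_getLast h]

-- ===== VERDICT (by name: the statement is the Claim_ definition above) =====
theorem all_combinations_memoized_spec : Claim_equal_all_combinations_memoized := by
  intro input memo concat _ hpre
  unfold Spec_all_combinations_memoized
  rw [alt_eq_pvF input memo concat hpre.1]
  unfold all_combinations_memoized
  apply pvGoA_fst concat input hpre.1
  intro p hp; exact hpre.2.1 p hp
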